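-- pv_equiv track=rewrite | github.com/hqhiwqy/AI- | Day21code/7.py | filter_prime_number
-- ===== SOURCE A (Python) =====
-- def filter_prime_number(arg):
--     result = []
--     for item in arg:
--         for i in range(2, item):
--             if item % i == 0:
--                 result.append(item)
--                 break
--     return result
-- ===== SOURCE B (Python) =====
-- def filter_prime_number(arg):
--     def has_proper_divisor(x):
--         d = 2
--         while d * d <= x:
--             if x % d == 0:
--                 return True
--             d += 1
--         return False
--     return [x for x in arg if has_proper_divisor(x)]
-- ===== Notes on version B (the rewrite author's own statement) =====
-- stated objective: alternative
-- what changed: Per-item scan of the whole range(2, item) with append-and-break is replaced by a divisor probe that only tests d while d*d <= item (a composite >= 4 always has a divisor at most its square root), applied in one filtering comprehension; measured speed is comparable on typical inputs since A breaks early on most composites.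
import Mathlib
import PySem

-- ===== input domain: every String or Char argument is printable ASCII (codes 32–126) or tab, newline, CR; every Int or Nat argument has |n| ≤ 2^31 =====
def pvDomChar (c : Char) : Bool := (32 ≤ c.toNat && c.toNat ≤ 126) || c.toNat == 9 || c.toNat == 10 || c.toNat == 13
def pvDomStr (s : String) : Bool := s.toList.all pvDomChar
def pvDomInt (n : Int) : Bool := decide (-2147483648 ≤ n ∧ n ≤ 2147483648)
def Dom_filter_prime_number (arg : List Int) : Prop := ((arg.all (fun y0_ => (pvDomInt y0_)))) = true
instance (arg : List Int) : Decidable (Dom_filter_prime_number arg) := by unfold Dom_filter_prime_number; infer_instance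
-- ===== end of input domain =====

-- B replaces A's full scan of range(2, item) by a divisor probe stopped at d*d ≤ item, in one filtering pass.

-- ===== PORT A =====
-- inner 'for i in range(2, item): if item % i == 0: append; break': lazy scan of the range with
-- early exit, exactly as Python's range iterates (fuel only makes the recursion structural;
-- item.toNat bounds the iteration count)
def rangeScanA (x : Int) : Nat → Int → Bool
  | 0, _ => false
  | n + 1, i =>
    if i < x then
      if PySem.Int.mod x i == 0 then true else rangeScanA x n (i + 1)
    else false

def filter_prime_number (arg : List Int) : List Int :=
  arg.foldl (fun result item =>
    if rangeScanA item item.toNat 2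
    then result ++ [item] else result) []

-- ===== PORT B =====
-- the 'while d * d <= x' loop of Source B's has_proper_divisor, with early return True on a divisor
-- (fuel parameter only makes the recursion structural; (x+3).toNat bounds the iteration count)
def hasPDgo (x : Int) : Nat → Int → Bool
  | 0, _ => false
  | n + 1, d =>
    if d * d ≤ x then
      if PySem.Int.mod x d == 0 then true else hasPDgo x n (d + 1)
    else false

def has_proper_divisor (x : Int) : Bool := hasPDgo x (x + 3).toNat 2

def filter_prime_number_alt (arg : List Int) : List Int :=
  arg.filter (fun x => has_proper_divisor x)

-- ===== PRECONDITION & SPEC =====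
def Spec_filter_prime_number (arg : List Int) (out : List Int) : Prop := out = filter_prime_number_alt arg
instance (arg : List Int) (out : List Int) : Decidable (Spec_filter_prime_number arg out) := by unfold Spec_filter_prime_number; infer_instance

-- ===== CLAIM (what is proved, stated in full; the proofs are below) =====
def Claim_equal_filter_prime_number : Prop := ∀ (arg : List Int), Dom_filter_prime_number arg → Spec_filter_prime_number arg (filter_prime_number arg)

-- ===== LEMMAS AND PROOFS =====

-- characterization of B's while loop, for start values d ≥ 2 and sufficient fuel
theorem hasPDgo_iff (x : Int) : ∀ (n : Nat) (d : Int), (x + 1 - d).toNat < n → 2 ≤ d →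
    (hasPDgo x n d = true ↔ ∃ e : Int, d ≤ e ∧ e * e ≤ x ∧ PySem.Int.mod x e = 0) := by
  intro n
  induction n with
  | zero => intro d hn _; omega
  | succ n ih =>
    intro d hn hd
    rw [hasPDgo]
    by_cases hdd : d * d ≤ x
    · simp only [hdd, if_pos]
      cases hmod : (PySem.Int.mod x d == 0) with
      | true =>
        simp only [if_pos]
        exact iff_of_true trivial ⟨d, le_refl d, hdd, by simpa using hmod⟩
      | false =>
        simp only [Bool.false_eq_true, if_false]
        have hdx : d ≤ x := by nlinarith
        have hmod' : ¬ PySem.Int.mod x d = 0 := by simpa using hmod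
        rw [ih (d + 1) (by omega) (by omega)]
        constructor
        · rintro ⟨e, hde, hee, hm⟩; exact ⟨e, by omega, hee, hm⟩
        · rintro ⟨e, hde, hee, hm⟩
          refine ⟨e, ?_, hee, hm⟩
          rcases eq_or_lt_of_le hde with rfl | h
          · exact absurd hm hmod'
          · omega
    · simp only [hdd, if_neg, not_false_iff]
      constructor
      · intro h; cases h
      · rintro ⟨e, hde, hee, _⟩
        exfalso
        have : d * d ≤ e * e := by nlinarith
        nlinarith

-- characterization of A's inner loop, for start values d ≥ 2 and sufficient fuel
theorem rangeScanA_iff (x : Int) : ∀ (n : Nat) (d : Int), (x - d).toNat < n → 2 ≤ d →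
    (rangeScanA x n d = true ↔ ∃ i : Int, d ≤ i ∧ i < x ∧ PySem.Int.mod x i = 0) := by
  intro n
  induction n with
  | zero => intro d hn _; omega
  | succ n ih =>
    intro d hn hd
    rw [rangeScanA]
    by_cases hdx : d < x
    · simp only [hdx, if_pos]
      cases hmod : (PySem.Int.mod x d == 0) with
      | true =>
        simp only [if_pos]
        exact iff_of_true trivial ⟨d, le_refl d, hdx, by simpa using hmod⟩
      | false =>
        simp only [Bool.false_eq_true, if_false]
        have hmod' : ¬ PySem.Int.mod x d = 0 := by simpa using hmod
        rw [ih (d + 1) (by omega) (by omega)]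
        constructor
        · rintro ⟨i, hdi, hix, hm⟩; exact ⟨i, by omega, hix, hm⟩
        · rintro ⟨i, hdi, hix, hm⟩
          refine ⟨i, ?_, hix, hm⟩
          rcases eq_or_lt_of_le hdi with rfl | h
          · exact absurd hm hmod'
          · omega
    · simp only [hdx, if_neg, not_false_iff]
      constructor
      · intro h; cases h
      · rintro ⟨i, hdi, hix, _⟩; omega

-- a divisor anywhere in [2, x) exists iff one exists with square ≤ x
theorem divisor_bridge (x : Int) :
    (∃ i : Int, 2 ≤ i ∧ i < x ∧ PySem.Int.mod x i = 0) ↔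
    (∃ e : Int, 2 ≤ e ∧ e * e ≤ x ∧ PySem.Int.mod x e = 0) := by
  constructor
  · rintro ⟨i, hi2, hix, hm⟩
    have hdvd : i ∣ x := (PySem.Int.mod_eq_zero_iff_dvd x i).mp hm
    by_cases hii : i * i ≤ x
    · exact ⟨i, hi2, hii, hm⟩
    · obtain ⟨q, hq⟩ := hdvd
      have hxpos : 0 < x := by omega
      have hqpos : 0 < q := by nlinarith
      have hq2 : 2 ≤ q := by
        by_contra h
        have hq1 : q = 1 := by omega
        rw [hq1, mul_one] at hq
        omega
      have hqq : q * q ≤ x := by nlinarith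
      have hqdvd : q ∣ x := ⟨i, by linarith [hq]⟩
      exact ⟨q, hq2, hqq, (PySem.Int.mod_eq_zero_iff_dvd x q).mpr hqdvd⟩
  · rintro ⟨e, he2, hee, hm⟩
    have hex : e < x := by nlinarith
    exact ⟨e, he2, hex, hm⟩

-- the two per-item tests agree
theorem item_test_eq (x : Int) :
    rangeScanA x x.toNat 2 = has_proper_divisor x := by
  rw [Bool.eq_iff_iff]
  have hA : rangeScanA x x.toNat 2 = true ↔
      ∃ i : Int, 2 ≤ i ∧ i < x ∧ PySem.Int.mod x i = 0 := by
    by_cases hx : 1 ≤ x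
    · exact rangeScanA_iff x x.toNat 2 (by omega) (le_refl _)
    · have h0 : x.toNat = 0 := by omega
      rw [h0]
      constructor
      · intro h; cases h
      · rintro ⟨i, h2, hix, _⟩; omega
  have hB : has_proper_divisor x = true ↔
      ∃ e : Int, 2 ≤ e ∧ e * e ≤ x ∧ PySem.Int.mod x e = 0 := by
    by_cases hx : -2 ≤ x
    · exact hasPDgo_iff x (x + 3).toNat 2 (by omega) (le_refl _)
    · have h0 : (x + 3).toNat = 0 := by omega
      unfold has_proper_divisor
      rw [h0]
      constructor
      · intro h; cases h
      · rintro ⟨e, h2, hee, _⟩; nlinarith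
  rw [hA, hB, divisor_bridge]

-- ===== VERDICT (by name: the statement is the Claim_ definition above) =====
theorem filter_prime_number_spec : Claim_equal_filter_prime_number := by
  intro arg _
  unfold Spec_filter_prime_number filter_prime_number filter_prime_number_alt
  have hf : (fun (result : List Int) (item : Int) =>
      if rangeScanA item item.toNat 2 then result ++ [item] else result) =
      (fun (result : List Int) (item : Int) =>
      if has_proper_divisor item then result ++ [item] else result) := by
    funext r i; rw [item_test_eq]
  rw [hf]
  simpa using PySem.List.foldl_append_if_eq_filter (l := arg)
    (p := fun x => has_proper_divisor x) (acc := [])
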